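-- pv_equiv track=rewrite | github.com/sossont/This_is_codingtest | 기출 풀이/2018 카카오 블라인드 1차/비밀 지도.py | solution
-- ===== SOURCE A (Python) =====
-- def solution(n, arr1, arr2):
--     answer = []
--     for i in range(n):
--         string = ''
--         ans = bin(arr1[i] | arr2[i])
--         ans = ans[2:]
--         if len(ans) != n:
--             tmp = " " * (n - len(ans))
--             ans = tmp + ans
--         for a in ans:
--             if a == '1':
--                 string += '#'
--             else:
--                 string += ' '
--         answer.append(string)
--
--     return answer
-- ===== SOURCE B (Python) =====
-- def solution(n, arr1, arr2):
--     # Build each row LSB-first by bit arithmetic (while v: v & 1, v >>= 1),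
--     # pad with blanks up to n, then reverse -- no bin()/string slicing.
--     def row(v):
--         cells = []
--         while v:
--             cells.append('#' if v & 1 else ' ')
--             v >>= 1
--         while len(cells) < n:
--             cells.append(' ')
--         return ''.join(reversed(cells))
--
--     return [row(a | b) for a, b in zip(arr1[:max(0, n)], arr2[:max(0, n)])]
-- ===== Notes on version B (the rewrite author's own statement) =====
-- stated objective: alternative
-- what changed: Each row is built by arithmetic bit extraction (while v: test v & 1, shift v >>= 1) LSB-first into a cell list that is padded and reversed, instead of A's bin()-string slicing, manual space-padding and per-character '1'-test; rows come from zipping the two sliced arrays rather than indexing by range(n).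
-- outside the precondition, e.g. on solution(1, [-1], [0]): A returns [' #'], B does not finish within the time limit; on solution(2, [5], [1]): A raises IndexError, B returns ['# #']
import Mathlib
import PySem

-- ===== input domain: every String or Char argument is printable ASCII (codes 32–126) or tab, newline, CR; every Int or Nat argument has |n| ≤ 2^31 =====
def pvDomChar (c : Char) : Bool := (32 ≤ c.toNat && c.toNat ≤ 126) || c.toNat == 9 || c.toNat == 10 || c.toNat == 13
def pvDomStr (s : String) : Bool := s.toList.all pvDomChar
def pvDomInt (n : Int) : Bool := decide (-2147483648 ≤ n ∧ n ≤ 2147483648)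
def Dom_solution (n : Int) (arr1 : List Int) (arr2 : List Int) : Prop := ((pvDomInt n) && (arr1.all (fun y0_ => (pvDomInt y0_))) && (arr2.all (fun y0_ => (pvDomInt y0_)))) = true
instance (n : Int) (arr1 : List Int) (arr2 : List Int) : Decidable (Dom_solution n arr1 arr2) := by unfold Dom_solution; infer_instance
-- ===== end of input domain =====

-- B builds each row by arithmetic bit extraction (LSB-first cells, pad, reverse) over zipped
-- slices, instead of A's bin()-string slicing with space-padding and per-character tests.


-- ===== PORT A =====
-- answer = []; for i in range(n): build the row from bin(arr1[i] | arr2[i])[2:].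
-- arr1[i]/arr2[i] are in range under Pre_ (otherwise Python raises IndexError), so pyGetD's
-- default is never used inside Pre_.  " " * (n - len(ans)) is empty for a non-positive count,
-- which (n - len).toNat reproduces exactly.  Strings are handled as List Char and packed with
-- String.mk at the end (string += c appends one character).
def solution (n : Int) (arr1 : List Int) (arr2 : List Int) : List String :=
  (PySem.List.pyRange 0 n 1).foldl (fun answer i =>
    let ans0 : List Char :=
      PySem.Int.toBinChars0b (PySem.Int.bor (PySem.List.pyGetD arr1 i 0) (PySem.List.pyGetD arr2 i 0))
    let ans1 : List Char := PySem.List.slice ans0 (some 2) none          -- ans[2:]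
    let ans : List Char :=
      if (PySem.List.len ans1) ≠ n
      then List.replicate (n - PySem.List.len ans1).toNat ' ' ++ ans1     -- tmp + ans
      else ans1
    let s : List Char := ans.foldl (fun acc a => acc ++ [if a = '1' then '#' else ' ']) []
    answer ++ [String.mk s]) []

-- ===== PORT B =====
-- while v: cells.append('#' if v & 1 else ' '); v >>= 1
-- Faithful for v ≥ 0 (guaranteed by Pre_); for v < 0 the Python loop never terminates.
def lsbCells (v : Nat) : List Char :=
  if h : v = 0 then []
  else (if v % 2 = 1 then '#' else ' ') :: lsbCells (v / 2)
decreasing_by exact Nat.div_lt_self (Nat.pos_of_ne_zero h) (by norm_num)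

-- while len(cells) < n: cells.append(' ')
def padCells (n : Int) (cells : List Char) : List Char :=
  if h : (cells.length : Int) < n then padCells n (cells ++ [' ']) else cells
termination_by (n - cells.length).toNat
decreasing_by simp only [List.length_append, List.length_singleton]; omega

def solution_alt (n : Int) (arr1 : List Int) (arr2 : List Int) : List String :=
  ((PySem.List.slice arr1 none (some (max 0 n))).zip
     (PySem.List.slice arr2 none (some (max 0 n)))).map
    (fun p => String.mk (padCells n (lsbCells (PySem.Int.bor p.1 p.2).toNat)).reverse)

-- ===== PRECONDITION & SPEC =====
-- Pre_ excludes (a) n > len(arr1) or n > len(arr2), where A raises IndexError, and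
-- (b) a negative entry among the first n of either array: there A's row is an accident of
-- slicing bin()'s '-0b' sign prefix (a stray 'b' rendered as blank), while B's bit-extraction
-- loop does not terminate.
def Pre_solution (n : Int) (arr1 : List Int) (arr2 : List Int) : Prop :=
  n ≤ arr1.length ∧ n ≤ arr2.length ∧
  (arr1.take n.toNat).all (fun x => 0 ≤ x) ∧ (arr2.take n.toNat).all (fun x => 0 ≤ x)
instance (n : Int) (arr1 : List Int) (arr2 : List Int) : Decidable (Pre_solution n arr1 arr2) := by
  unfold Pre_solution; infer_instance

def pvWitness_solution : Int × List Int × List Int := (3, [9, 20, 28, 18, 11], [30, 1, 21, 17, 28])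

def Spec_solution (n : Int) (arr1 : List Int) (arr2 : List Int) (out : List String) : Prop := out = solution_alt n arr1 arr2
instance (n : Int) (arr1 : List Int) (arr2 : List Int) (out : List String) : Decidable (Spec_solution n arr1 arr2 out) := by unfold Spec_solution; infer_instance

-- ===== CLAIM (what is proved, stated in full; the proofs are below) =====
def Claim_equal_solution : Prop := ∀ (n : Int) (arr1 : List Int) (arr2 : List Int), Dom_solution n arr1 arr2 → Pre_solution n arr1 arr2 → Spec_solution n arr1 arr2 (solution n arr1 arr2)

-- ===== LEMMAS AND PROOFS =====

-- '#' if bit else ' ', applied to a binary digit character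
def pvPhi (a : Char) : Char := if a = '1' then '#' else ' '

-- MSB-first binary digits of v, with gbin 0 = ['0']  (closed recursion for Nat.toDigits 2)
def gbin (v : Nat) : List Char :=
  if h : v < 2 then [Nat.digitChar v]
  else gbin (v / 2) ++ [Nat.digitChar (v % 2)]
decreasing_by exact Nat.div_lt_self (by omega) (by norm_num)

lemma toDigitsCore_eq_gbin : ∀ (fuel v : Nat) (ds : List Char), v < fuel →
    Nat.toDigitsCore 2 fuel v ds = gbin v ++ ds := by
  intro fuel
  induction fuel with
  | zero => omega
  | succ f ih =>
    intro v ds hv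
    rw [Nat.toDigitsCore]
    by_cases h2 : v / 2 = 0
    · simp only [h2]
      rw [gbin, dif_pos (by omega)]
      have : v % 2 = v := Nat.mod_eq_of_lt (by omega)
      simp [this]
    · rw [if_neg h2, ih (v / 2) _ (by omega)]
      rw [show gbin v = gbin (v / 2) ++ [Nat.digitChar (v % 2)] from by
        rw [gbin]; exact dif_neg (by omega)]
      simp

lemma toDigits_eq_gbin (v : Nat) : Nat.toDigits 2 v = gbin v := by
  rw [Nat.toDigits, toDigitsCore_eq_gbin (v + 1) v [] (by omega), List.append_nil]

lemma lsbCells_reverse (v : Nat) (hv : 1 ≤ v) :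
    (lsbCells v).reverse = (gbin v).map pvPhi := by
  induction v using Nat.strong_induction_on with
  | _ v ih =>
    rw [lsbCells, dif_neg (by omega)]
    by_cases h2 : v / 2 = 0
    · have hv1 : v = 1 := by omega
      subst hv1
      rw [gbin, dif_pos (by norm_num)]
      simp [lsbCells, pvPhi, Nat.digitChar]
    · rw [gbin, dif_neg (by omega)]
      simp only [List.reverse_cons, List.map_append,
        ih (v / 2) (Nat.div_lt_self (by omega) (by norm_num)) (by omega)]
      congr 1
      have : v % 2 = 0 ∨ v % 2 = 1 := by omega
      rcases this with h | h <;> simp [h, pvPhi, Nat.digitChar]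

lemma lsbCells_length (v : Nat) (hv : 1 ≤ v) : (lsbCells v).length = (gbin v).length := by
  have := congrArg List.length (lsbCells_reverse v hv)
  simpa using this

lemma padCells_eq (n : Int) (cells : List Char) :
    padCells n cells = cells ++ List.replicate (n - cells.length).toNat ' ' := by
  fun_induction padCells with
  | case1 cells h ih =>
    rw [ih, List.append_assoc]
    congr 1
    have h1 : (n - (cells.length : Int)).toNat = (n - ((cells ++ [' ']).length : Int)).toNat + 1 := by
      simp only [List.length_append, List.length_singleton]; push_cast; omega
    rw [h1, List.replicate_succ]
    rfl
  | case2 cells h =>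
    have : (n - (cells.length : Int)).toNat = 0 := by omega
    simp [this]

lemma foldl_phi (l : List Char) :
    l.foldl (fun acc a => acc ++ [if a = '1' then '#' else ' ']) ([] : List Char) = l.map pvPhi := by
  have := PySem.List.foldl_append_singleton_eq_map (fun a => if a = '1' then '#' else ' ') l []
  simpa [pvPhi] using this

-- one row: A's bin-slice-pad-map string equals B's bit-cells-pad-reverse string, for 1 ≤ n, 0 ≤ v
lemma row_eq (n : Int) (hn : 1 ≤ n) (v : Int) (hv : 0 ≤ v) :
    (let ans0 : List Char := PySem.Int.toBinChars0b v
     let ans1 : List Char := PySem.List.slice ans0 (some 2) none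
     let ans : List Char :=
       if (PySem.List.len ans1) ≠ n
       then List.replicate (n - PySem.List.len ans1).toNat ' ' ++ ans1
       else ans1
     ans.foldl (fun acc a => acc ++ [if a = '1' then '#' else ' ']) [])
    = (padCells n (lsbCells v.toNat)).reverse := by
  simp only []
  have hb : ¬ v < 0 := by omega
  rw [PySem.Int.toBinChars0b]
  rw [if_neg hb]
  have hslice : PySem.List.slice ('0' :: 'b' :: Nat.toDigits 2 v.toNat) (some 2) none
      = Nat.toDigits 2 v.toNat := by
    rw [show (2 : Int) = ((2 : Nat) : Int) by norm_num, PySem.List.slice_from_natCast]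
    rfl
  rw [hslice, toDigits_eq_gbin]
  -- collapse the padding 'if' into an unconditional replicate-prefix
  have hif : (if (PySem.List.len (gbin v.toNat)) ≠ n
      then List.replicate (n - PySem.List.len (gbin v.toNat)).toNat ' ' ++ gbin v.toNat
      else gbin v.toNat)
      = List.replicate (n - (gbin v.toNat).length).toNat ' ' ++ gbin v.toNat := by
    by_cases h : (PySem.List.len (gbin v.toNat)) ≠ n
    · rw [if_pos h]; simp [PySem.List.len_eq]
    · rw [if_neg h]
      simp only [PySem.List.len_eq] at h
      have : (n - ((gbin v.toNat).length : Int)).toNat = 0 := by omega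
      simp [this]
  rw [hif, foldl_phi, padCells_eq, List.reverse_append, List.reverse_replicate, List.map_append]
  have hrep : (List.replicate (n - (gbin v.toNat).length : Int).toNat ' ').map pvPhi
      = List.replicate (n - (gbin v.toNat).length : Int).toNat ' ' := by
    simp [List.map_replicate, pvPhi]
  rw [hrep]
  by_cases h0 : v.toNat = 0
  · -- v = 0: A emits n-1 blanks then a blank '0'; B emits n blanks
    rw [h0]
    have hg : gbin 0 = ['0'] := by rw [gbin]; decide
    have hl : lsbCells 0 = [] := by rw [lsbCells]; simp
    rw [hg, hl]
    simp only [List.length_singleton, List.length_nil, List.reverse_nil, List.append_nil]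
    have : (n - (0 : Nat) : Int).toNat = (n - (1 : Nat) : Int).toNat + 1 := by push_cast; omega
    rw [this, List.replicate_succ']
    simp [pvPhi]
  · rw [← lsbCells_reverse v.toNat (by omega), lsbCells_length v.toNat (by omega)]

-- zip of two equal-length prefixes, as a map over indices
lemma zip_take_map {γ : Type} (k : Nat) (a b : List Int) (F : Int × Int → γ)
    (ha : k ≤ a.length) (hb : k ≤ b.length) :
    ((a.take k).zip (b.take k)).map F
      = (List.range k).map (fun i => F (a.getD i 0, b.getD i 0)) := by
  apply List.ext_getElem
  · simp; omega
  · intro i h1 h2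
    have hik : i < k := by simpa using h2
    simp only [List.getElem_map, List.getElem_zip, List.getElem_take, List.getElem_range]
    congr 1
    have g1 : a.getD i 0 = a[i] := List.getD_eq_getElem a 0 (by omega)
    have g2 : b.getD i 0 = b[i] := List.getD_eq_getElem b 0 (by omega)
    rw [g1, g2]

-- ===== VERDICT (by name: the statement is the Claim_ definition above) =====
theorem solution_spec : Claim_equal_solution := by
  intro n arr1 arr2 _hdom hpre
  obtain ⟨h1, h2, hp1, hp2⟩ := hpre
  unfold Spec_solution solution solution_alt
  -- A side: foldl-append becomes a map over range n
  rw [PySem.List.foldl_append_singleton_eq_map]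
  rw [PySem.List.pyRange_one, List.map_map, List.nil_append]
  -- B side: slices are takes, then zip-map becomes a map over range n
  have hmax : (0 : Int) ≤ max 0 n := le_max_left 0 n
  rw [PySem.List.slice_to arr1 hmax, PySem.List.slice_to arr2 hmax]
  have htn : (max 0 n).toNat = n.toNat := by omega
  rw [htn]
  rw [zip_take_map n.toNat arr1 arr2 _ (by omega) (by omega)]
  have hsub : (n - 0).toNat = n.toNat := by omega
  rw [hsub]
  -- pointwise equality of the two row builders
  apply List.map_congr_left
  intro k hk
  have hkn : k < n.toNat := List.mem_range.mp hk
  simp only [Function.comp, zero_add, PySem.List.pyGetD_natCast]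
  have hx : 0 ≤ arr1.getD k 0 := by
    have : arr1.getD k 0 ∈ arr1.take n.toNat := by
      rw [List.getD_eq_getElem arr1 0 (by omega)]
      exact List.mem_take_iff_getElem.mpr ⟨k, by omega, by simp⟩
    simpa using List.all_eq_true.mp hp1 _ this
  have hy : 0 ≤ arr2.getD k 0 := by
    have : arr2.getD k 0 ∈ arr2.take n.toNat := by
      rw [List.getD_eq_getElem arr2 0 (by omega)]
      exact List.mem_take_iff_getElem.mpr ⟨k, by omega, by simp⟩
    simpa using List.all_eq_true.mp hp2 _ this
  have hbor : 0 ≤ PySem.Int.bor (arr1.getD k 0) (arr2.getD k 0) := by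
    rw [PySem.Int.bor_of_nonneg hx hy]; positivity
  have := row_eq n (by omega) (PySem.Int.bor (arr1.getD k 0) (arr2.getD k 0)) hbor
  simp only [] at this ⊢
  rw [this]
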